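-- pv_equiv track=rewrite | github.com/WMGDataScience/chest_xrays_triaging | evaluate_predictions/cf_from_net_results.py | fromV10toV11
-- ===== SOURCE A (Python) =====
-- def fromV10toV11(classes):
--     result = []
--     V10_V11_map = {
--                     'abnormal_other':['dextrocardia','unfolded_aorta','hemidiaphragm_elevated',
--                                       'atelectasis','bronchial_wall_thickening','bulla','emphysema',
--                                       'hyperexpanded_lungs','mediastinum_displaced','mediastinum_widened', 'scoliosis'],
--                     'collapse':['left_lower_lobe_collapse','left_upper_lobe_collapse','right_middle_lobe_collapse',
--                                 'right_lower_lobe_collapse','right_upper_lobe_collapse'],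
--                     'intraabdominal_pathology':['dilated_bowel','pneumoperitoneum'],
--                     'bone_abnormality' : ['rib_lesion' ,'rib_fracture' ,'clavicle_fracture'],
--                     'airspace_opacifation' : ['ground_glass_opacification','consolidation'],
--                     'cardiomegaly':['cardiomegaly'],
--                     'parenchymal_lesion':['parenchymal_lesion','cavitating_lung_lesion'],
--                     'interstitial_shadowing':['interstitial_shadowing'],
--                     'paratracheal_hilar_enlargement':['paratracheal_hilar_enlargement'],
--                     'pneumomediastinum':['pneumomediastinum'],
--                     'object':['object'],
--                     'normal':['normal'],
--                     'pleural_abnormality':['pleural_abnormality','pleural_effusion'],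
--                     'pneumothorax':['pneumothorax'],
--                     'subcutaneous_emphysema':['subcutaneous_emphysema'],
--                     'hiatus_hernia':['hernia']
--                    }
--     for cl in classes:
--         for sup_cl in V10_V11_map.keys():
--             if cl in V10_V11_map[sup_cl] and not sup_cl in result:
--                 result.append(sup_cl)
--                 break
--
--     if len(result) == 0 and len(classes) > 0:
--         result.append('normal')
--
--     return result
-- ===== SOURCE B (Python) =====
-- def fromV10toV11(classes):
--     V10_V11_map = {
--                     'abnormal_other':['dextrocardia','unfolded_aorta','hemidiaphragm_elevated',
--                                       'atelectasis','bronchial_wall_thickening','bulla','emphysema',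
--                                       'hyperexpanded_lungs','mediastinum_displaced','mediastinum_widened', 'scoliosis'],
--                     'collapse':['left_lower_lobe_collapse','left_upper_lobe_collapse','right_middle_lobe_collapse',
--                                 'right_lower_lobe_collapse','right_upper_lobe_collapse'],
--                     'intraabdominal_pathology':['dilated_bowel','pneumoperitoneum'],
--                     'bone_abnormality' : ['rib_lesion' ,'rib_fracture' ,'clavicle_fracture'],
--                     'airspace_opacifation' : ['ground_glass_opacification','consolidation'],
--                     'cardiomegaly':['cardiomegaly'],
--                     'parenchymal_lesion':['parenchymal_lesion','cavitating_lung_lesion'],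
--                     'interstitial_shadowing':['interstitial_shadowing'],
--                     'paratracheal_hilar_enlargement':['paratracheal_hilar_enlargement'],
--                     'pneumomediastinum':['pneumomediastinum'],
--                     'object':['object'],
--                     'normal':['normal'],
--                     'pleural_abnormality':['pleural_abnormality','pleural_effusion'],
--                     'pneumothorax':['pneumothorax'],
--                     'subcutaneous_emphysema':['subcutaneous_emphysema'],
--                     'hiatus_hernia':['hernia']
--                    }
--     # build the reverse index once: member class -> its (single) superclass
--     sup_of = {}
--     for sup_cl, members in V10_V11_map.items():
--         for m in members:
--             sup_of[m] = sup_cl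
--     result = []
--     for cl in classes:
--         sup = sup_of.get(cl)
--         if sup is not None and sup not in result:
--             result.append(sup)
--     if not result and classes:
--         result.append('normal')
--     return result
-- ===== Notes on version B (the rewrite author's own statement) =====
-- stated objective: faster
-- what changed: B builds a reverse member->superclass dict once and replaces A's per-class scan over all 16 superclass member lists (with break) by a single O(1) lookup per input class.
import Mathlib
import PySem

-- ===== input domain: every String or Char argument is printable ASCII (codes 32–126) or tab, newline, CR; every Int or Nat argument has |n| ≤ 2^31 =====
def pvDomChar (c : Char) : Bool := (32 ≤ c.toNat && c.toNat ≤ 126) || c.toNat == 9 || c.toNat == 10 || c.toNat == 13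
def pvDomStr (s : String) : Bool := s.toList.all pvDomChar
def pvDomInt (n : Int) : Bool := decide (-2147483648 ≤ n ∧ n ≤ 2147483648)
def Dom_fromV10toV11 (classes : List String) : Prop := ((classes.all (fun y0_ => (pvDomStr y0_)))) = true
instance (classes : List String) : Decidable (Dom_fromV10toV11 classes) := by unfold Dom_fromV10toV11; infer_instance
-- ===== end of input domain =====

-- B replaces A's per-class scan over all 16 superclass member lists by a reverse
-- member→superclass dict built once, with one lookup per input class (objective: simpler).

-- ===== PORT A =====
-- the literal V10→V11 map, in Python's insertion order (shared data between both ports)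
def v10v11Map : List (String × List String) :=
  [ ("abnormal_other", ["dextrocardia","unfolded_aorta","hemidiaphragm_elevated",
                        "atelectasis","bronchial_wall_thickening","bulla","emphysema",
                        "hyperexpanded_lungs","mediastinum_displaced","mediastinum_widened","scoliosis"]),
    ("collapse", ["left_lower_lobe_collapse","left_upper_lobe_collapse","right_middle_lobe_collapse",
                  "right_lower_lobe_collapse","right_upper_lobe_collapse"]),
    ("intraabdominal_pathology", ["dilated_bowel","pneumoperitoneum"]),
    ("bone_abnormality", ["rib_lesion","rib_fracture","clavicle_fracture"]),
    ("airspace_opacifation", ["ground_glass_opacification","consolidation"]),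
    ("cardiomegaly", ["cardiomegaly"]),
    ("parenchymal_lesion", ["parenchymal_lesion","cavitating_lung_lesion"]),
    ("interstitial_shadowing", ["interstitial_shadowing"]),
    ("paratracheal_hilar_enlargement", ["paratracheal_hilar_enlargement"]),
    ("pneumomediastinum", ["pneumomediastinum"]),
    ("object", ["object"]),
    ("normal", ["normal"]),
    ("pleural_abnormality", ["pleural_abnormality","pleural_effusion"]),
    ("pneumothorax", ["pneumothorax"]),
    ("subcutaneous_emphysema", ["subcutaneous_emphysema"]),
    ("hiatus_hernia", ["hernia"]) ]

-- A's inner loop: 'for sup_cl in V10_V11_map.keys(): if cl in … and not sup_cl in result: append; break'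
def aInner (res : List String) (cl : String) : List (String × List String) → List String
  | [] => res
  | (sup, ms) :: rest =>
      if cl ∈ ms ∧ sup ∉ res then res ++ [sup] else aInner res cl rest

def fromV10toV11 (classes : List String) : List String :=
  let result := classes.foldl (fun res cl => aInner res cl v10v11Map) []
  if result.length = 0 ∧ classes.length > 0 then result ++ ["normal"] else result

-- ===== PORT B =====
-- the reverse index: 'for sup_cl, members in V10_V11_map.items(): for m in members: sup_of[m] = sup_cl'
def supOfDict : PySem.Dict String String :=
  v10v11Map.foldl (fun d p => p.2.foldl (fun d m => d.insert m p.1) d) PySem.Dict.empty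

-- 'sup = sup_of.get(cl); if sup is not None and sup not in result: result.append(sup)'
def bStep (res : List String) (cl : String) : List String :=
  match supOfDict.get? cl with
  | none => res
  | some s => if s ∈ res then res else res ++ [s]

def fromV10toV11_alt (classes : List String) : List String :=
  let result := classes.foldl bStep []
  if result.isEmpty ∧ classes ≠ [] then result ++ ["normal"] else result

-- ===== PRECONDITION & SPEC =====
def Spec_fromV10toV11 (classes : List String) (out : List String) : Prop := out = fromV10toV11_alt classes
instance (classes : List String) (out : List String) : Decidable (Spec_fromV10toV11 classes out) := by unfold Spec_fromV10toV11; infer_instance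

-- ===== CLAIM (what is proved, stated in full; the proofs are below) =====
def Claim_equal_fromV10toV11 : Prop := ∀ (classes : List String), Dom_fromV10toV11 classes → Spec_fromV10toV11 classes (fromV10toV11 classes)

-- ===== LEMMAS AND PROOFS =====

-- first superclass whose member list contains cl (proof-only abstraction of both steps)
def findSup (cl : String) : List (String × List String) → Option String
  | [] => none
  | (sup, ms) :: rest => if cl ∈ ms then some sup else findSup cl rest

theorem aInner_of_absent (res : List String) (cl : String) :
    ∀ ps : List (String × List String), (∀ p ∈ ps, cl ∉ p.2) → aInner res cl ps = res := by
  intro ps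
  induction ps with
  | nil => intro _; rfl
  | cons p rest ih =>
      intro h
      obtain ⟨sup, ms⟩ := p
      simp only [aInner]
      rw [if_neg (fun hc => h (sup, ms) (by simp) hc.1)]
      exact ih (fun q hq => h q (by simp [hq]))

-- A's inner loop, characterised through findSup, given pairwise-disjoint member lists
theorem aInner_char (cl : String) :
    ∀ (ps : List (String × List String)),
      ps.Pairwise (fun p q => ∀ x ∈ p.2, x ∉ q.2) →
      ∀ res, aInner res cl ps =
        (match findSup cl ps with
         | none => res
         | some s => if s ∈ res then res else res ++ [s]) := by
  intro ps
  induction ps with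
  | nil => intro _ res; rfl
  | cons p rest ih =>
      intro hpw res
      obtain ⟨sup, ms⟩ := p
      rw [List.pairwise_cons] at hpw
      by_cases hin : cl ∈ ms
      · simp only [aInner, findSup, if_pos hin]
        by_cases hsup : sup ∈ res
        · rw [if_neg (fun hc => hc.2 hsup), if_pos hsup]
          exact aInner_of_absent res cl rest (fun q hq => hpw.1 q hq cl hin)
        · rw [if_pos ⟨hin, hsup⟩, if_neg hsup]
      · simp only [aInner, findSup, if_neg hin]
        rw [if_neg (fun hc => hin hc.1)]
        exact ih hpw.2 res

-- lookup in a dict whose entries are the reversed map, block by block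
theorem get?_mk_flat (cl : String) :
    ∀ (ps : List (String × List String)) (tail : List (String × String)),
      (PySem.Dict.mk (ps.flatMap (fun p => p.2.map (fun m => (m, p.1))) ++ tail)).get? cl =
        (match findSup cl ps with
         | none => (PySem.Dict.mk tail).get? cl
         | some s => some s) := by
  intro ps
  induction ps with
  | nil => intro tail; rfl
  | cons p rest ih =>
      intro tail
      obtain ⟨sup, ms⟩ := p
      simp only [List.flatMap_cons, List.append_assoc]
      have block : ∀ (ms' : List String) (t : List (String × String)),
          (PySem.Dict.mk ((ms'.map (fun m => (m, sup))) ++ t)).get? cl =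
            (if cl ∈ ms' then some sup else (PySem.Dict.mk t).get? cl) := by
        intro ms'
        induction ms' with
        | nil => intro t; simp
        | cons m ms'' ih' =>
            intro t
            simp only [List.map_cons, List.cons_append, PySem.Dict.get?_mk_cons, List.mem_cons]
            by_cases hm : m = cl
            · subst hm; simp
            · rw [if_neg (by simpa using hm), ih' t]
              simp [Ne.symm hm]
      rw [block, ih tail]
      simp only [findSup]
      by_cases hin : cl ∈ ms
      · rw [if_pos hin, if_pos hin]
      · rw [if_neg hin, if_neg hin]

set_option maxRecDepth 8192 in
theorem supOf_items :
    supOfDict = PySem.Dict.mk (v10v11Map.flatMap (fun p => p.2.map (fun m => (m, p.1)))) := by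
  decide

theorem get?_supOf (cl : String) : supOfDict.get? cl = findSup cl v10v11Map := by
  rw [supOf_items, ← List.append_nil (v10v11Map.flatMap _), get?_mk_flat]
  cases findSup cl v10v11Map <;> rfl

set_option maxRecDepth 8192 in
theorem map_disjoint : v10v11Map.Pairwise (fun p q => ∀ x ∈ p.2, x ∉ q.2) := by
  decide

set_option maxRecDepth 8192 in
theorem step_eq (res : List String) (cl : String) :
    bStep res cl = aInner res cl v10v11Map := by
  unfold bStep
  rw [get?_supOf, aInner_char cl v10v11Map map_disjoint res]

-- ===== VERDICT (by name: the statement is the Claim_ definition above) =====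
theorem fromV10toV11_spec : Claim_equal_fromV10toV11 := by
  intro classes _
  show fromV10toV11 classes = fromV10toV11_alt classes
  unfold fromV10toV11 fromV10toV11_alt
  have hfold : classes.foldl (fun res cl => aInner res cl v10v11Map) [] =
      classes.foldl bStep [] := by
    rw [show bStep = fun res cl => aInner res cl v10v11Map from funext₂ step_eq]
  rw [hfold]
  cases classes.foldl bStep [] <;> cases classes <;> simp
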